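-- pv_equiv track=rewrite | github.com/egi-190137/latihan_programming | Google Kickstart/Round E/Coloring Game.py | coloring_game
-- ===== SOURCE A (Python) =====
-- def coloring_game(n):
--     sequence = [ True for _ in range(n) ]
--     bot = True
--     count_bot = 0
--     for i in range(0, len(sequence), 2):
--         sequence[i] = False
--         if bot:
--             bot = False
--             count_bot += 1
--         else:
--             bot = True
--     return count_bot
-- ===== SOURCE B (Python) =====
-- def coloring_game(n):
--     # closed form: the loop runs ceil(n/2) times and the bot colors on every
--     # other iteration starting with the first, i.e. ceil(ceil(n/2)/2) cells
--     m = (n + 1) // 2 if n > 0 else 0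
--     return (m + 1) // 2
-- ===== Notes on version B (the rewrite author's own statement) =====
-- stated objective: faster
-- what changed: Replaces the list allocation and step-2 loop with the closed form ceil(ceil(n/2)/2), computed in O(1).
import Mathlib
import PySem

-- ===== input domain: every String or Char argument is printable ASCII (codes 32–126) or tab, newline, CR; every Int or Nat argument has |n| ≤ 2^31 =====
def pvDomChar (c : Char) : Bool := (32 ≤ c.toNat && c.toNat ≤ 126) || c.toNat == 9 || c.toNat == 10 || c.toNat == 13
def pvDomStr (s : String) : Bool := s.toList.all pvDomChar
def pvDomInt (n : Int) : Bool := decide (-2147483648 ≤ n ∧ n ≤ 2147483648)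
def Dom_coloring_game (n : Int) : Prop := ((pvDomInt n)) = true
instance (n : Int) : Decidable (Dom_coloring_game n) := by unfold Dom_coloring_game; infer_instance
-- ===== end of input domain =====

-- B replaces A's list allocation and step-2 loop by the O(1) closed form ceil(ceil(n/2)/2).

-- ===== PORT A =====
-- literal port: builds the list, loops over range(0, len, 2) mutating the list and the
-- (bot, count_bot) state; the index i is always nonnegative and in range, so .toNat/set is exact here
def coloring_game (n : Int) : Int :=
  let sequence : Array Bool := ((PySem.List.pyRange 0 n 1).map (fun _ => true)).toArray
  let st :=
    (PySem.List.pyRange 0 (sequence.size : Int) 2).foldl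
      (fun (st : Array Bool × Bool × Int) i =>
        let seq := st.1.set! i.toNat false
        if st.2.1 then (seq, false, st.2.2 + 1) else (seq, true, st.2.2))
      (sequence, true, (0 : Int))
  st.2.2

-- ===== PORT B =====
def coloring_game_alt (n : Int) : Int :=
  let m : Int := if 0 < n then PySem.Int.floordiv (n + 1) 2 else 0
  PySem.Int.floordiv (m + 1) 2

-- ===== PRECONDITION & SPEC =====
def Spec_coloring_game (n : Int) (out : Int) : Prop := out = coloring_game_alt n
instance (n : Int) (out : Int) : Decidable (Spec_coloring_game n out) := by unfold Spec_coloring_game; infer_instance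

-- ===== CLAIM (what is proved, stated in full; the proofs are below) =====
def Claim_equal_coloring_game : Prop := ∀ (n : Int), Dom_coloring_game n → Spec_coloring_game n (coloring_game n)

-- ===== LEMMAS AND PROOFS =====

-- the count component of A's loop depends only on the number of iterations and the bot flag
theorem count_foldl (l : List Int) : ∀ (seq : Array Bool) (bot : Bool) (c : Int),
    (l.foldl
      (fun (st : Array Bool × Bool × Int) i =>
        let seq := st.1.set! i.toNat false
        if st.2.1 then (seq, false, st.2.2 + 1) else (seq, true, st.2.2))
      (seq, bot, c)).2.2
    = c + (if bot then ((l.length : Int) + 1) / 2 else (l.length : Int) / 2) := by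
  induction l with
  | nil => intro seq bot c; simp
  | cons x xs ih =>
    intro seq bot c
    cases bot <;> simp only [List.foldl_cons, Bool.false_eq_true, if_false, if_true,
        ih, List.length_cons] <;> push_cast <;> omega

theorem coloring_game_spec : Claim_equal_coloring_game := by
  intro n _
  unfold Spec_coloring_game coloring_game coloring_game_alt
  simp only [List.size_toArray, List.length_map, PySem.List.length_pyRange_one, count_foldl, PySem.Int.floordiv]
  by_cases h : n ≤ 0
  · have hz : (((n - 0).toNat : Int)) = 0 := by omega
    rw [hz]
    simp [PySem.List.pyRange_of_pos 0 0 (show (0:Int) < 2 by norm_num),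
      if_neg (show ¬(0:Int) < n by omega)]
  · rw [PySem.List.pyRange_of_pos _ _ (by norm_num)]
    have h1 : (0:Int) < ((n - 0).toNat : Int) := by omega
    simp only [if_pos (show (0:Int) < ((n-0).toNat : Int) by omega), List.length_map,
      List.length_range]
    have hfd : ∀ a : Int, 0 ≤ a → Int.fdiv a 2 = a / 2 := by
      intro a _; rw [Int.fdiv_eq_ediv]; omega
    simp only [if_pos (show (0:Int) < n by omega), hfd (n+1) (by omega)]
    have h2 : ((((n - 0).toNat : Int) - 0 + 2 - 1) / 2).toNat = ((n + 1) / 2).toNat := by omega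
    rw [h2]
    rw [hfd ((n+1)/2 + 1) (by omega)]
    simp only [if_pos (show True by trivial)]
    omega

-- ===== VERDICT (by name: the statement is the Claim_ definition above) =====
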